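-- pv_equiv track=rewrite | github.com/MisterGranti67/Huffman | Huffman.py | bitStream2str
-- ===== SOURCE A (Python) =====
-- def bitStream2str(myTextcoded : str) -> tuple[str,int]:
--     """ convertit un stream  binaire '0'|'1' en texte
--         (codage 8 bits)
--
--         return c'est X et len(myTextcoded)
--     """
--     test = ""
--     text = len(myTextcoded)%8
--     nombre_binaire = []
--     for i in range(text,len(myTextcoded),8):
--         nombre_binaire.append(myTextcoded[i:i+8])
--     for i in nombre_binaire:
--         test += chr(ord(chr(int(i,2))))
--     return test,len(myTextcoded)
-- ===== SOURCE B (Python) =====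
-- def bitStream2str(myTextcoded: str) -> tuple[str, int]:
--     """Bulk conversion: one int(...,2) over the whole stripped stream, then
--     to_bytes/latin-1 decode, instead of a per-8-bit-chunk loop."""
--     stripped = myTextcoded[len(myTextcoded) % 8:]
--     if not stripped:
--         return "", len(myTextcoded)
--     n = int(stripped, 2)
--     text = n.to_bytes(len(stripped) // 8, 'big').decode('latin-1')
--     return text, len(myTextcoded)
-- ===== Notes on version B (the rewrite author's own statement) =====
-- stated objective: simpler
-- what changed: Replaces the per-8-bit-chunk slice/int/chr/append loop by stripping the leading remainder once, converting the whole stripped bit string with a single int(...,2), and emitting all bytes at once via to_bytes(...,'big').decode('latin-1').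
-- outside the precondition, e.g. on bitStream2str('       1'): A returns ('\x01', 8), B returns ('\x01', 8)
import Mathlib
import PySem

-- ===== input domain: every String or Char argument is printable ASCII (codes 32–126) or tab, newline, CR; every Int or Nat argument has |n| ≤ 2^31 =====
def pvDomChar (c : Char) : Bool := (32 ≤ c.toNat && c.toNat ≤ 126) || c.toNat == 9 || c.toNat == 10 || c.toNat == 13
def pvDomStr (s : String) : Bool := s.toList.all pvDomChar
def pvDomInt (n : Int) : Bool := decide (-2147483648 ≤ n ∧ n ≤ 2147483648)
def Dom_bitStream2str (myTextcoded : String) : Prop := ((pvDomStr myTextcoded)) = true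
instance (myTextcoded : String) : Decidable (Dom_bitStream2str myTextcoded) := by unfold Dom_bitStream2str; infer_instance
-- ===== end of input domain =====

-- B replaces A's per-8-bit-chunk parse-and-append loop by one bulk binary→integer
-- conversion followed by a big-endian byte extraction (simpler, shorter).

-- ===== PORT A =====
-- int(i, 2), ported by hand as a left fold over binary digits: exact on the
-- '0'/'1'-only strings Pre_ admits (Python's int(·, 2) additionally tolerates
-- whitespace/sign/underscore forms, which Pre_ excludes).
def binVal (s : List Char) : Nat :=
  s.foldl (fun a c => a * 2 + (if c = '1' then 1 else 0)) 0

def bitStream2str (myTextcoded : String) : String × Int :=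
  let L := myTextcoded.toList
  let text : Int := PySem.Int.mod (L.length : Int) 8
  let nombre_binaire : List (List Char) :=
    (PySem.List.pyRange text (L.length : Int) 8).foldl
      (fun acc i => acc ++ [PySem.List.slice L (some i) (some (i + 8))]) []
  -- chr(ord(chr(v))) = chr(v); the chunk values are < 256, where chr is Char.ofNat
  let test : List Char :=
    nombre_binaire.foldl (fun t i => t ++ [Char.ofNat (binVal i)]) []
  (String.ofList test, (L.length : Int))

-- ===== PORT B =====
-- n.to_bytes(k, 'big').decode('latin-1'): bytes produced low byte first, consed
-- onto the accumulator (so the result reads big-endian).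
def bytesBE : Nat → Nat → List Char → List Char
  | _, 0, acc => acc
  | n, k + 1, acc => bytesBE (n / 256) k (Char.ofNat (n % 256) :: acc)

def bitStream2str_alt (myTextcoded : String) : String × Int :=
  let L := myTextcoded.toList
  let stripped := L.drop (L.length % 8)
  if stripped.isEmpty then ("", (L.length : Int))
  else
    let n := binVal stripped
    (String.ofList (bytesBE n (stripped.length / 8) []), (L.length : Int))

-- ===== PRECONDITION & SPEC =====
-- Pre_ excludes the inputs where int(chunk, 2) raises ValueError, i.e. any non-'0'/'1'
-- character from index len%8 on; it also excludes streams that A accepts only because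
-- int(·, 2) tolerates incidental whitespace/sign/underscore inside a chunk.
def Pre_bitStream2str (myTextcoded : String) : Prop :=
  (myTextcoded.toList.drop (myTextcoded.toList.length % 8)).all
    (fun c => c = '0' || c = '1') = true
instance (myTextcoded : String) : Decidable (Pre_bitStream2str myTextcoded) := by
  unfold Pre_bitStream2str; infer_instance

def pvWitness_bitStream2str : String := "11000001"

def Spec_bitStream2str (myTextcoded : String) (out : String × Int) : Prop := out = bitStream2str_alt myTextcoded
instance (myTextcoded : String) (out : String × Int) : Decidable (Spec_bitStream2str myTextcoded out) := by unfold Spec_bitStream2str; infer_instance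

-- ===== CLAIM (what is proved, stated in full; the proofs are below) =====
def Claim_equal_bitStream2str : Prop := ∀ (myTextcoded : String), Dom_bitStream2str myTextcoded → Pre_bitStream2str myTextcoded → Spec_bitStream2str myTextcoded (bitStream2str myTextcoded)

-- ===== LEMMAS AND PROOFS =====

theorem binVal_foldl (y : List Char) (a : Nat) :
    y.foldl (fun a c => a * 2 + (if c = '1' then 1 else 0)) a
      = a * 2 ^ y.length + binVal y := by
  induction y generalizing a with
  | nil => simp [binVal]
  | cons c y ih =>
      simp only [List.foldl_cons, List.length_cons, binVal]
      rw [ih, ih (0 * 2 + if c = '1' then 1 else 0)]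
      ring

theorem binVal_append (x y : List Char) :
    binVal (x ++ y) = binVal x * 2 ^ y.length + binVal y := by
  unfold binVal
  rw [List.foldl_append, binVal_foldl]
  rfl

theorem binVal_lt (s : List Char) : binVal s < 2 ^ s.length := by
  induction s with
  | nil => simp [binVal]
  | cons c s ih =>
      show List.foldl _ (0 * 2 + (if c = '1' then 1 else 0)) s < _
      rw [binVal_foldl]
      have h1 : (if c = '1' then (1:Nat) else 0) ≤ 1 := by split <;> omega
      have h2 : (0 : Nat) < 2 ^ s.length := Nat.two_pow_pos _
      simp only [List.length_cons, pow_succ]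
      nlinarith [ih]

theorem bytesBE_acc (k : Nat) : ∀ (n : Nat) (acc : List Char),
    bytesBE n k acc = bytesBE n k [] ++ acc := by
  induction k with
  | zero => intro n acc; simp [bytesBE]
  | succ k ih =>
      intro n acc
      rw [bytesBE, bytesBE, ih (n / 256) (Char.ofNat (n % 256) :: acc),
          ih (n / 256) [Char.ofNat (n % 256)]]
      simp

-- the chunk list A builds, as a structural recursion (proof-side helper)
def chunk8 (s : List Char) : List (List Char) :=
  if h : s = [] then [] else s.take 8 :: chunk8 (s.drop 8)
termination_by s.length
decreasing_by
  have : 0 < s.length := List.length_pos_iff.mpr h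
  simp [List.length_drop]; omega

theorem chunk8_nil : chunk8 [] = [] := by rw [chunk8]; simp

theorem chunk8_ne_nil (s : List Char) (h : s ≠ []) :
    chunk8 s = s.take 8 :: chunk8 (s.drop 8) := by rw [chunk8]; simp [h]

theorem chunk8_append_last (m : Nat) : ∀ (r b : List Char),
    r.length = 8 * m → b.length = 8 → chunk8 (r ++ b) = chunk8 r ++ [b] := by
  induction m with
  | zero =>
      intro r b hr hb
      have hr0 : r = [] := List.eq_nil_of_length_eq_zero (by omega)
      subst hr0
      rw [List.nil_append, chunk8_nil, chunk8_ne_nil b (by intro h; simp [h] at hb)]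
      have t1 : List.take 8 b = b := List.take_of_length_le (by omega)
      have t2 : List.drop 8 b = [] := List.drop_eq_nil_of_le (by omega)
      rw [t1, t2, chunk8_nil]
      rfl
  | succ m ih =>
      intro r b hr hb
      have hrne : r ≠ [] := by intro h; simp [h] at hr
      have h8 : 8 ≤ r.length := by omega
      rw [chunk8_ne_nil (r ++ b) (by simp [hrne]), chunk8_ne_nil r hrne]
      have ht : (r ++ b).take 8 = r.take 8 := List.take_append_of_le_length h8
      have hd : (r ++ b).drop 8 = r.drop 8 ++ b := List.drop_append_of_le_length h8
      rw [ht, hd, ih (r.drop 8) b (by simp; omega) hb]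
      simp

theorem chunkMap_eq_bytes (k : Nat) : ∀ (s : List Char), s.length = 8 * k →
    (chunk8 s).map (fun c => Char.ofNat (binVal c)) = bytesBE (binVal s) k [] := by
  induction k with
  | zero =>
      intro s hs
      have : s = [] := List.eq_nil_of_length_eq_zero (by omega)
      subst this; simp [chunk8_nil, bytesBE]
  | succ k ih =>
      intro s hs
      have hsplit : s = s.take (8 * k) ++ s.drop (8 * k) := (List.take_append_drop _ _).symm
      have hr : (s.take (8 * k)).length = 8 * k := by simp; omega
      have hb : (s.drop (8 * k)).length = 8 := by simp; omega
      rw [hsplit, chunk8_append_last k _ _ hr hb, List.map_append,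
          ih (s.take (8 * k)) hr, binVal_append]
      have hlt : binVal (s.drop (8 * k)) < 256 := by
        have h := binVal_lt (s.drop (8 * k)); rw [hb] at h; simpa using h
      rw [hb]
      rw [show (2:Nat) ^ 8 = 256 from by norm_num]
      have hdiv : (binVal (List.take (8 * k) s) * 256 + binVal (List.drop (8 * k) s)) / 256
          = binVal (List.take (8 * k) s) := by omega
      have hmod : (binVal (List.take (8 * k) s) * 256 + binVal (List.drop (8 * k) s)) % 256
          = binVal (List.drop (8 * k) s) := by omega
      rw [bytesBE, hdiv, hmod,
          bytesBE_acc k (binVal (List.take (8 * k) s)) [Char.ofNat (binVal (List.drop (8 * k) s))]]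
      simp

theorem range_slices (k : Nat) : ∀ (j : Nat) (L : List Char), L.length = j + 8 * k →
    (List.range k).map (fun t => (L.drop (j + 8 * t)).take 8) = chunk8 (L.drop j) := by
  induction k with
  | zero =>
      intro j L hL
      have hd : List.drop j L = [] := List.drop_eq_nil_of_le (by omega)
      simp [hd, chunk8_nil]
  | succ k ih =>
      intro j L hL
      have hne : L.drop j ≠ [] := by
        intro h
        have h2 := congrArg List.length h
        simp at h2; omega
      rw [List.range_succ_eq_map, List.map_cons, List.map_map, chunk8_ne_nil _ hne,
          List.drop_drop]
      refine List.cons_eq_cons.mpr ⟨by simp, ?_⟩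
      rw [← ih (j + 8) L (by omega)]
      apply List.map_congr_left
      intro t _
      simp only [Function.comp_apply]
      rw [show j + 8 * (t + 1) = j + 8 + 8 * t from by ring]

theorem ports_eq (s : String) : bitStream2str s = bitStream2str_alt s := by
  simp only [bitStream2str, bitStream2str_alt]
  set L := s.toList with hLdef
  have hmod : PySem.Int.mod (L.length : Int) 8 = ((L.length % 8 : Nat) : Int) := by
    exact_mod_cast PySem.Int.mod_natCast L.length 8
  rw [hmod]
  have hc : (if ((L.length % 8 : Nat) : Int) < (L.length : Int)
        then (((L.length : Int) - ((L.length % 8 : Nat) : Int) + 8 - 1) / 8).toNat else 0)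
      = L.length / 8 := by split_ifs with h <;> omega
  rw [PySem.List.pyRange_of_pos _ _ (by norm_num : (0:Int) < 8), hc]
  rw [PySem.List.foldl_append_singleton_eq_map, PySem.List.foldl_append_singleton_eq_map]
  simp only [List.nil_append, List.map_map]
  have hslices : List.map
      ((fun i => Char.ofNat (binVal i)) ∘
        (fun i => PySem.List.slice L (some i) (some (i + 8))) ∘
        (fun k : Nat => ((L.length % 8 : Nat) : Int) + 8 * (k : Int)))
      (List.range (L.length / 8))
      = List.map (fun c => Char.ofNat (binVal c)) (chunk8 (L.drop (L.length % 8))) := by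
    rw [← range_slices (L.length / 8) (L.length % 8) L (by omega), List.map_map]
    apply List.map_congr_left
    intro t _
    simp only [Function.comp_apply]
    rw [show ((L.length % 8 : Nat) : Int) + 8 * (t : Int)
          = ((L.length % 8 + 8 * t : Nat) : Int) from by push_cast; ring]
    rw [show ((L.length % 8 + 8 * t : Nat) : Int) + 8
          = ((L.length % 8 + 8 * t + 8 : Nat) : Int) from by push_cast; ring]
    rw [PySem.List.slice_natCast]
    rw [show L.length % 8 + 8 * t + 8 - (L.length % 8 + 8 * t) = 8 from by omega]
  rw [hslices]
  have hstr : (L.drop (L.length % 8)).length = 8 * (L.length / 8) := by simp; omega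
  rw [chunkMap_eq_bytes (L.length / 8) _ hstr]
  by_cases hE : (L.drop (L.length % 8)).isEmpty
  · have hd : L.drop (L.length % 8) = [] := List.isEmpty_iff.mp hE
    have h0 : L.length / 8 = 0 := by
      have hl := congrArg List.length hd; simp at hl; omega
    rw [if_pos hE, h0]
    simp [bytesBE]
  · rw [if_neg hE, hstr,
        show 8 * (L.length / 8) / 8 = L.length / 8 from by omega]

theorem bitStream2str_spec : Claim_equal_bitStream2str := by
  intro s _ _
  unfold Spec_bitStream2str
  exact ports_eq s
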